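-- pv_equiv track=rewrite | github.com/houxizhu/python | codeforces/edu.174/c.beautiful-sequence.py | codeforces
-- ===== SOURCE A (Python) =====
-- def codeforces(n, arr):
--     ll = len(arr)
--     result = 0
--     for ii in range(ll-2):
--         if arr[ii] == 1:
--             count2 = 0
--             for jj in range(ii+1, ll):
--                 if arr[jj] == 2:
--                     count2 += 1
--                 elif arr[jj] == 3:
--                     result += 2**count2-1
--     return result
--
--     ### wrong answer for 9 / 1 2 3 2 1 3 2 2 3
--     ### the first element must be 1
--     while arr[0] != 1:
--         arr.pop(0)
--     ### the last element must be 3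
--     while arr[-1] != 3:
--         arr.pop()
--
--     ll = len(arr)
--     ### total number of possible substrings
--     result = 2**ll-1
--     count2 = 0
--     for ii in range(ll):
--         if arr[ii] == 2:
--             count2 += 1
--     result -= 2**count2-1
--
--     return result
-- ===== SOURCE B (Python) =====
-- def codeforces(n, arr):
--     # Single left-to-right pass.
--     # s = sum over 1s seen so far of 2^(number of 2s seen after that 1);
--     # ones = number of 1s seen so far; each 3 adds s - ones.
--     s = 0
--     ones = 0
--     result = 0
--     for x in arr:
--         if x == 1:
--             s += 1
--             ones += 1
--         elif x == 2:
--             s *= 2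
--         elif x == 3:
--             result += s - ones
--     return result
-- ===== Notes on version B (the rewrite author's own statement) =====
-- stated objective: alternative
-- what changed: Replaced A's nested loops (for each 1, rescan the whole suffix counting 2s and summing 2^count2-1 per 3) by a single left-to-right pass keeping a running sum that doubles on each 2, grows on each 1, and is paid out (minus the 1-count) on each 3; A is quadratic only when the array contains many 1s, which the random timing inputs do not exercise.
import Mathlib
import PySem

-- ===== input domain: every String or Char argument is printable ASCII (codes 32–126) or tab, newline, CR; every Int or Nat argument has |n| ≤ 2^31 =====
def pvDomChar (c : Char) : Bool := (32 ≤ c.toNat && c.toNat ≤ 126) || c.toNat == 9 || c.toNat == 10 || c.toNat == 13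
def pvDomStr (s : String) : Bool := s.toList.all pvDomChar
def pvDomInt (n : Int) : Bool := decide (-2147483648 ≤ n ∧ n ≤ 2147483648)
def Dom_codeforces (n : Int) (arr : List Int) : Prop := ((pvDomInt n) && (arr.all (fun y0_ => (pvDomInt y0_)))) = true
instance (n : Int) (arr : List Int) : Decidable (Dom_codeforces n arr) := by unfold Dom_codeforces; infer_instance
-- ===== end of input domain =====

-- B replaces A's nested loops (for each 1, rescan the suffix) by a single left-to-right pass
-- (double a running sum on each 2, add it minus the 1-count on each 3); same return value.

-- ===== PORT A =====
-- A's inner loop body applied to one element value (arr[jj] in Python);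
-- count2 ≥ 0 always, so Python's 2**count2 is exactly 2 ^ count2.toNat.
def pvInnerStepA (st : Int × Int) (v : Int) : Int × Int :=
  if v = 2 then (st.1 + 1, st.2)
  else if v = 3 then (st.1, st.2 + 2 ^ st.1.toNat - 1)
  else st

-- ll = len(arr) and the initial result = 0 are inlined.
def codeforces (n : Int) (arr : List Int) : Int :=
  (PySem.List.pyRange 0 ((arr.length : Int) - 2)).foldl
    (fun result ii =>
      if PySem.List.pyGetD arr ii 0 = 1 then
        ((PySem.List.pyRange (ii + 1) (arr.length : Int)).foldl
          (fun st jj => pvInnerStepA st (PySem.List.pyGetD arr jj 0)) (0, result)).2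
      else result) 0

-- ===== PORT B =====
-- state (s, ones, result) as in Source B
def codeforces_alt (n : Int) (arr : List Int) : Int :=
  (arr.foldl
    (fun (st : Int × Int × Int) x =>
      if x = 1 then (st.1 + 1, st.2.1 + 1, st.2.2)
      else if x = 2 then (st.1 * 2, st.2.1, st.2.2)
      else if x = 3 then (st.1, st.2.1, st.2.2 + st.1 - st.2.1)
      else st) ((0, 0, 0) : Int × Int × Int)).2.2

-- ===== PRECONDITION & SPEC =====
def Spec_codeforces (n : Int) (arr : List Int) (out : Int) : Prop := out = codeforces_alt n arr
instance (n : Int) (arr : List Int) (out : Int) : Decidable (Spec_codeforces n arr out) := by unfold Spec_codeforces; infer_instance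

-- ===== CLAIM (what is proved, stated in full; the proofs are below) =====
def Claim_equal_codeforces : Prop := ∀ (n : Int) (arr : List Int), Dom_codeforces n arr → Spec_codeforces n arr (codeforces n arr)

-- ===== LEMMAS AND PROOFS =====

-- pvT2 l = Σ over 3s in l of 2^(number of 2s in l before that 3)
def pvT2 : List Int → Int
  | [] => 0
  | x :: l => if x = 2 then 2 * pvT2 l else if x = 3 then 1 + pvT2 l else pvT2 l

-- pvTh3 l = number of 3s in l
def pvTh3 : List Int → Int
  | [] => 0
  | x :: l => (if x = 3 then 1 else 0) + pvTh3 l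

-- pvTot l = the weighted count of (1, 2s, 3) subsequences of l
def pvTot : List Int → Int
  | [] => 0
  | x :: l => (if x = 1 then pvT2 l - pvTh3 l else 0) + pvTot l

theorem pvB_fold (l : List Int) (s ones r : Int) :
    (l.foldl
      (fun (st : Int × Int × Int) x =>
        if x = 1 then (st.1 + 1, st.2.1 + 1, st.2.2)
        else if x = 2 then (st.1 * 2, st.2.1, st.2.2)
        else if x = 3 then (st.1, st.2.1, st.2.2 + st.1 - st.2.1)
        else st) (s, ones, r)).2.2
      = r + s * pvT2 l - ones * pvTh3 l + pvTot l := by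
  induction l generalizing s ones r with
  | nil => simp [pvT2, pvTh3, pvTot]
  | cons x l ih =>
    by_cases h1 : x = 1
    · simp only [List.foldl_cons, h1, if_pos rfl, ih, pvT2, pvTh3, pvTot]
      norm_num; ring
    · by_cases h2 : x = 2
      · simp only [List.foldl_cons, h2, h1, if_neg, if_pos rfl, ih, pvT2, pvTh3, pvTot]
        norm_num; ring
      · by_cases h3 : x = 3
        · simp only [List.foldl_cons, h3, h1, h2, if_pos rfl, ih, pvT2, pvTh3, pvTot]
          norm_num; ring
        · simp only [List.foldl_cons, if_neg h1, if_neg h2, if_neg h3, ih, pvT2, pvTh3, pvTot]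
          simp [h1, h2, h3]

theorem pvA_inner (l : List Int) (c r : Int) (hc : 0 ≤ c) :
    (l.foldl pvInnerStepA (c, r)).2 = r + 2 ^ c.toNat * pvT2 l - pvTh3 l := by
  induction l generalizing c r with
  | nil => simp [pvT2, pvTh3]
  | cons x l ih =>
    by_cases h2 : x = 2
    · rw [List.foldl_cons, show pvInnerStepA (c, r) x = (c + 1, r) by simp [pvInnerStepA, h2],
        ih (c + 1) r (by omega), pvT2, pvTh3]
      have hcn : (c + 1).toNat = c.toNat + 1 := by omega
      simp [h2, hcn]; ring
    · by_cases h3 : x = 3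
      · rw [List.foldl_cons,
          show pvInnerStepA (c, r) x = (c, r + 2 ^ c.toNat - 1) by simp [pvInnerStepA, h2, h3],
          ih c _ hc, pvT2, pvTh3]
        simp [h2, h3]; ring
      · rw [List.foldl_cons,
          show pvInnerStepA (c, r) x = (c, r) by simp [pvInnerStepA, h2, h3],
          ih c r hc, pvT2, pvTh3]
        simp [h2, h3]

-- the contribution of the 1 at index ii (0 if arr[ii] ≠ 1)
def pvTerm (arr : List Int) (ii : Int) : Int :=
  if PySem.List.pyGetD arr ii 0 = 1
  then pvT2 (arr.drop (ii + 1).toNat) - pvTh3 (arr.drop (ii + 1).toNat)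
  else 0

theorem pvTerm_shift (x : Int) (l : List Int) (k : Nat) :
    pvTerm (x :: l) (1 + (k : Int)) = pvTerm l k := by
  unfold pvTerm
  rw [show (1 + (k : Int)) = ((k + 1 : Nat) : Int) by push_cast; ring,
    PySem.List.pyGetD_natCast, PySem.List.pyGetD_natCast,
    show (((k + 1 : Nat) : Int) + 1).toNat = k + 2 by omega,
    show (((k : Nat) : Int) + 1).toNat = k + 1 by omega]
  simp

theorem pvTot_eq_sum (arr : List Int) :
    pvTot arr = ((PySem.List.pyRange 0 (arr.length : Int)).map (pvTerm arr)).sum := by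
  induction arr with
  | nil => simp [pvTot, PySem.List.pyRange_one_eq_nil (le_refl (0 : Int))]
  | cons x l ih =>
    have hc : (0 : Int) < ((x :: l).length : Int) := by simp
    rw [PySem.List.pyRange_one_cons hc, List.map_cons, List.sum_cons]
    have hhead : pvTerm (x :: l) 0 = (if x = 1 then pvT2 l - pvTh3 l else 0) := by
      have h0 : PySem.List.pyGetD (x :: l) 0 0 = x := PySem.List.pyGetD_natCast (x :: l) 0 0
      unfold pvTerm
      rw [h0]
      simp
    have htail : ((PySem.List.pyRange (0 + 1) ((x :: l).length : Int)).map (pvTerm (x :: l)))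
        = (PySem.List.pyRange 0 (l.length : Int)).map (pvTerm l) := by
      rw [PySem.List.pyRange_one, PySem.List.pyRange_one]
      simp only [List.map_map]
      rw [show (((x :: l).length : Int) - (0 + 1)).toNat = l.length by simp,
        show ((l.length : Int) - 0).toNat = l.length by omega]
      apply List.map_congr_left
      intro k _
      simp only [Function.comp_apply]
      rw [show (0 : Int) + 1 + (k : Int) = 1 + (k : Int) by ring, pvTerm_shift,
        show (0 : Int) + (k : Int) = (k : Int) by ring]
    rw [hhead, htail, ← ih, pvTot]

theorem pvT2_eq_th3_of_short (l : List Int) (h : l.length ≤ 1) : pvT2 l = pvTh3 l := by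
  match l with
  | [] => rfl
  | [x] => simp [pvT2, pvTh3]; omega
  | _ :: _ :: _ => simp at h

theorem pvTot_short (l : List Int) (h : l.length ≤ 1) : pvTot l = 0 := by
  match l with
  | [] => rfl
  | [x] => simp [pvTot, pvT2, pvTh3]
  | _ :: _ :: _ => simp at h

-- ===== VERDICT (by name: the statement is the Claim_ definition above) =====
theorem codeforces_spec : Claim_equal_codeforces := by
  unfold Claim_equal_codeforces
  intro n arr _
  unfold Spec_codeforces codeforces codeforces_alt
  rw [pvB_fold]
  rw [PySem.List.foldl_congr_mem _ _ (fun acc ii => acc + pvTerm arr ii) 0 ?hcong]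
  case hcong =>
    intro acc ii hii
    rw [PySem.List.mem_pyRange_one] at hii
    rw [PySem.List.foldl_pyRange_pyGetD' arr 0 pvInnerStepA (0, acc) (by omega : (0 : Int) ≤ ii + 1),
      pvA_inner _ 0 acc (le_refl 0)]
    unfold pvTerm
    split_ifs with h
    · simp only [Int.toNat_zero, pow_zero, one_mul]
      rw [if_pos h]; ring
    · simp [h]
  rw [PySem.List.foldl_add]
  by_cases h2 : 2 ≤ (arr.length : Int)
  · rw [pvTot_eq_sum,
      PySem.List.pyRange_one_append 0 ((arr.length : Int) - 2) (arr.length : Int) (by omega) (by omega),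
      List.map_append, List.sum_append]
    have hz : ((PySem.List.pyRange ((arr.length : Int) - 2) (arr.length : Int)).map (pvTerm arr)).sum = 0 := by
      apply List.sum_eq_zero
      intro y hy
      simp only [List.mem_map] at hy
      obtain ⟨ii, hii, rfl⟩ := hy
      rw [PySem.List.mem_pyRange_one] at hii
      unfold pvTerm
      split_ifs with h
      · rw [pvT2_eq_th3_of_short]
        · ring
        · simp only [List.length_drop]; omega
      · rfl
    rw [hz]; ring
  · rw [PySem.List.pyRange_one_eq_nil (by omega : (arr.length : Int) - 2 ≤ 0),
      pvTot_short arr (by omega)]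
    simp
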